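-- pv_equiv track=rewrite | github.com/TobiasErpen/DiceMagic | DiceMagic.py | IncreaseDice
-- ===== SOURCE A (Python) =====
-- def IncreaseDice(dice, dieType, pointer = 0):
-- 	'''
-- 	Increases the die, which is at the pointers position, by one.
-- 	If the targeted die would be increased over the dieType value, the next die will be increased instead and the die at the pointers position will be set to 1.
--
-- 	pointer:	Position of the cecked die.
-- 	'''
-- 	if pointer == len(dice):
-- 		raise Exception("Dice calculation: pointer out of range.")
--
-- 	if dice[pointer] < dieType:
-- 		dice[pointer] += 1
-- 		return dice
-- 	if dice[pointer] == dieType: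
-- 		dice[pointer] = 1
-- 		pointer += 1
-- 		return IncreaseDice(dice, dieType, pointer)
--
-- 	if dice[pointer] > dieType:
-- 		raise Exception("Die has a to high number")
--
-- 	return dice
-- ===== SOURCE B (Python) =====
-- def IncreaseDice(dice, dieType, pointer = 0):
-- 	'''
-- 	Iterative two-phase version: settle the run of dice equal to dieType to 1,
-- 	then do a single bounds / too-high check and increment. Mutates dice in place like the original.
-- 	'''
-- 	n = len(dice)
-- 	i = pointer
-- 	while i != n and dice[i] == dieType:
-- 		dice[i] = 1
-- 		i += 1
-- 	if i == n:
-- 		raise Exception("Dice calculation: pointer out of range.")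
-- 	if dice[i] > dieType:
-- 		raise Exception("Die has a to high number")
-- 	dice[i] += 1
-- 	return dice
-- ===== Notes on version B (the rewrite author's own statement) =====
-- stated objective: simpler
-- what changed: Replaces A's tail recursion with an iterative two-phase loop: first settle the run of dice equal to dieType to 1 while advancing the pointer, then a single bounds/too-high check and increment; same in-place mutation and exception messages.
import Mathlib
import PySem

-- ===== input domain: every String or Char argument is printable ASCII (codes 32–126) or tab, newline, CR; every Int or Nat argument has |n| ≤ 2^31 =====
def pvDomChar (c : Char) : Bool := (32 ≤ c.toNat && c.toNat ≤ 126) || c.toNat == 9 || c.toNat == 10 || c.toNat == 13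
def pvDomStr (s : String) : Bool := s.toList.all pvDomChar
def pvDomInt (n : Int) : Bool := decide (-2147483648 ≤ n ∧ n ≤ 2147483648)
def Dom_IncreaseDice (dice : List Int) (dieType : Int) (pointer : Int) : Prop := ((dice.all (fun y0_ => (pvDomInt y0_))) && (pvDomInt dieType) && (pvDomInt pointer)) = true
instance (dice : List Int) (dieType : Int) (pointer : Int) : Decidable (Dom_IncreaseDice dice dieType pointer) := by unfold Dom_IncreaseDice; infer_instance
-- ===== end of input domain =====

-- B replaces A's tail recursion with an iterative two-phase loop (settle the carry run, then one increment);
-- both mutate `dice` in place in Python, so the equivalence proved here covers the mutation as well as the return value.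

-- ===== PORT A =====
-- Literal port of A's tail recursion. Where Python raises (pointer == len, IndexError,
-- die too high) the port returns the current list; Pre_ excludes exactly those inputs.
def IncreaseDice (dice : List Int) (dieType : Int) (pointer : Int) : List Int :=
  if pointer = (dice.length : Int) then dice          -- raise "pointer out of range"
  else
    match h : PySem.List.pyGet? dice pointer with
    | none => dice                                     -- IndexError
    | some v =>
      if v < dieType then PySem.List.pySetD dice pointer (v + 1)
      else if v = dieType then
        IncreaseDice (PySem.List.pySetD dice pointer 1) dieType (pointer + 1)
      else dice                                        -- raise "Die has a to high number"
termination_by ((dice.length : Int) - pointer).toNat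
decreasing_by
  have hin : PySem.Raise.InRange dice.length pointer := by
    by_contra hc
    rw [← PySem.List.pyGet?_eq_none_iff (xs := dice)] at hc
    simp [hc] at h
  have : pointer < (dice.length : Int) := hin.2
  simp only [PySem.List.length_pySetD]
  omega

-- ===== PORT B =====
-- `settleRun` is B's while loop (set the run of dice equal to dieType to 1, advancing i);
-- `bump` is B's straight-line tail (bounds check, too-high check, increment).
def settleRun (dice : List Int) (dieType : Int) (i : Int) : List Int × Int :=
  if i = (dice.length : Int) then (dice, i)
  else
    match h : PySem.List.pyGet? dice i with
    | none => (dice, i)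
    | some v =>
      if v = dieType then settleRun (PySem.List.pySetD dice i 1) dieType (i + 1)
      else (dice, i)
termination_by ((dice.length : Int) - i).toNat
decreasing_by
  have hin : PySem.Raise.InRange dice.length i := by
    by_contra hc
    rw [← PySem.List.pyGet?_eq_none_iff (xs := dice)] at hc
    simp [hc] at h
  have : i < (dice.length : Int) := hin.2
  simp only [PySem.List.length_pySetD]
  omega

def bump (dice : List Int) (dieType : Int) (i : Int) : List Int :=
  if i = (dice.length : Int) then dice                 -- raise "pointer out of range"
  else
    match PySem.List.pyGet? dice i with
    | none => dice                                     -- IndexError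
    | some v =>
      if dieType < v then dice                         -- raise "Die has a to high number"
      else PySem.List.pySetD dice i (v + 1)

def IncreaseDice_alt (dice : List Int) (dieType : Int) (pointer : Int) : List Int :=
  let p := settleRun dice dieType pointer
  bump p.1 dieType p.2

-- ===== PRECONDITION & SPEC =====
-- Pre_ holds exactly where Python A returns normally: the (possibly negatively-started,
-- wrapping) carry scan reaches a die strictly below dieType before running off the end
-- or meeting a die above dieType.  Excluded are only the inputs on which A raises.
def Pre_IncreaseDice (dice : List Int) (dieType : Int) (pointer : Int) : Prop :=
  -(dice.length : Int) ≤ pointer ∧ pointer < (dice.length : Int) ∧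
  (let s : Nat := (if pointer < 0 then pointer + dice.length else pointer).toNat
   let vs : List Int :=
     dice.drop s ++ (if pointer < 0 then dice.take s ++ List.replicate (dice.length - s) 1 else [])
   ((vs.dropWhile (fun x => x == dieType)).headD dieType) < dieType)
instance (dice : List Int) (dieType : Int) (pointer : Int) : Decidable (Pre_IncreaseDice dice dieType pointer) := by unfold Pre_IncreaseDice; infer_instance

def pvWitness_IncreaseDice : List Int × Int × Int := ([6, 6, 2], 6, 0)

def Spec_IncreaseDice (dice : List Int) (dieType : Int) (pointer : Int) (out : List Int) : Prop := out = IncreaseDice_alt dice dieType pointer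
instance (dice : List Int) (dieType : Int) (pointer : Int) (out : List Int) : Decidable (Spec_IncreaseDice dice dieType pointer out) := by unfold Spec_IncreaseDice; infer_instance

-- ===== CLAIM (what is proved, stated in full; the proofs are below) =====
def Claim_equal_IncreaseDice : Prop := ∀ (dice : List Int) (dieType : Int) (pointer : Int), Dom_IncreaseDice dice dieType pointer → Pre_IncreaseDice dice dieType pointer → Spec_IncreaseDice dice dieType pointer (IncreaseDice dice dieType pointer)

-- ===== LEMMAS AND PROOFS =====

-- The ports agree on every input (even where the Pythons raise): A's recursion step
-- is exactly one settleRun step, and its terminal branches are exactly `bump`.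
-- Unfolding equations for settleRun's dependent match (one per loop outcome).
theorem settleRun_len (dice : List Int) (dieType : Int) :
    settleRun dice dieType (dice.length : Int) = (dice, (dice.length : Int)) := by
  rw [settleRun]; simp

theorem settleRun_none (dice : List Int) (dieType : Int) (i : Int)
    (hlen : ¬ i = (dice.length : Int)) (h : PySem.List.pyGet? dice i = none) :
    settleRun dice dieType i = (dice, i) := by
  rw [settleRun, if_neg hlen]; split <;> simp_all

theorem settleRun_stop (dice : List Int) (dieType : Int) (i v : Int)
    (hlen : ¬ i = (dice.length : Int)) (h : PySem.List.pyGet? dice i = some v)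
    (hne : ¬ v = dieType) :
    settleRun dice dieType i = (dice, i) := by
  rw [settleRun, if_neg hlen]; split <;> simp_all

theorem settleRun_carry (dice : List Int) (dieType : Int) (i : Int)
    (hlen : ¬ i = (dice.length : Int)) (h : PySem.List.pyGet? dice i = some dieType) :
    settleRun dice dieType i = settleRun (PySem.List.pySetD dice i 1) dieType (i + 1) := by
  rw [settleRun, if_neg hlen]; split <;> simp_all

-- The ports agree on every input (even where the Pythons raise): A's recursion step
-- is exactly one settleRun step, and its terminal branches are exactly `bump`.
theorem IncreaseDice_eq_alt (dice : List Int) (dieType : Int) (pointer : Int) :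
    IncreaseDice dice dieType pointer = IncreaseDice_alt dice dieType pointer := by
  fun_induction IncreaseDice dice dieType pointer with
  | case1 d =>
      simp only [IncreaseDice_alt, settleRun_len]
      simp [bump]
  | case2 d p hlen h =>
      simp only [IncreaseDice_alt, settleRun_none d dieType p hlen h]
      simp [bump, hlen, h]
  | case3 d p hlen v h hv =>
      have hne : ¬ v = dieType := by omega
      have hnlt : ¬ dieType < v := by omega
      simp only [IncreaseDice_alt, settleRun_stop d dieType p v hlen h hne]
      simp [bump, hlen, h, hnlt]
  | case4 d p hlen h hlt ih =>
      rw [ih]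
      simp only [IncreaseDice_alt, settleRun_carry d dieType p hlen h]
  | case5 d p hlen v h hnlt hne =>
      have hgt : dieType < v := by omega
      simp only [IncreaseDice_alt, settleRun_stop d dieType p v hlen h hne]
      simp [bump, hlen, h, hgt]

-- ===== VERDICT (by name: the statement is the Claim_ definition above) =====
theorem IncreaseDice_spec : Claim_equal_IncreaseDice := by
  intro dice dieType pointer _ _
  exact IncreaseDice_eq_alt dice dieType pointer
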